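-- pv_equiv track=rewrite | github.com/dohye/CodeSignal | 21-isIPv4Address.py | isIPv4Address
-- ===== SOURCE A (Python) =====
-- def isIPv4Address(inputString):
--
--     result = True
--     if inputString.count('.') != 3:
--         result = False
--
--     else:
--         a = inputString.split('.')
--         for i in a:
--             try:
--                 if str(int(i)) == str(i):
--                     i = int(i)
--                     if 0 <= i <= 255: pass
--                     else:
--                         result = False
--
--                 else: result = False
--
--             except:
--                 result = False
--
--     return result
-- ===== SOURCE B (Python) =====
-- def isIPv4Address(inputString):
--     # single left-to-right scan; no split, no int()
--     octets = 0
--     value = 0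
--     length = 0
--     for c in inputString + '.':
--         if c == '.':
--             if length == 0 or octets == 4:
--                 return False
--             octets += 1
--             value = 0
--             length = 0
--         elif '0' <= c <= '9':
--             if length > 0 and value == 0:
--                 return False
--             value = value * 10 + (ord(c) - 48)
--             length += 1
--             if value > 255:
--                 return False
--         else:
--             return False
--     return octets == 4
-- ===== Notes on version B (the rewrite author's own statement) =====
-- stated objective: alternative
-- what changed: B replaces A's dot-count/split/int()-round-trip validation by a single left-to-right character scan that builds each octet's value incrementally and rejects on the first bad character, leading zero, overflow past 255, empty octet or fifth octet, with no splitting and no int/str conversions.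
import Mathlib
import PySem

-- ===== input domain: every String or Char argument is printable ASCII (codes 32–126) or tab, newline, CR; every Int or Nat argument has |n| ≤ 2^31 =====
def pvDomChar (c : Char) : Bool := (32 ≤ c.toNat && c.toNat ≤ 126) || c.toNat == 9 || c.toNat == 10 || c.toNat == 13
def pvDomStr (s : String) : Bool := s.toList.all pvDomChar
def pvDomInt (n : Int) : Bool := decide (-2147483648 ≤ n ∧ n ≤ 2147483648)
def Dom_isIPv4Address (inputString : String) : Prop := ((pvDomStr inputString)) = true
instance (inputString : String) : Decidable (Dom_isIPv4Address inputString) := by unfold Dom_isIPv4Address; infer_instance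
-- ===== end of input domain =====

-- B replaces A's dot-count/split/int()-round-trip validation by a single left-to-right
-- character scan with incremental octet value (objective: alternative single-pass algorithm).

-- ===== PORT A =====
def isIPv4Address (inputString : String) : Bool :=
  let result := true
  if PySem.Str.count inputString "." ≠ 3 then
    false
  else
    -- inputString.split('.'): the separator "." is non-empty, so Python's split never raises;
    -- PySem.Chars.splitOn is exactly that split (pieces left to right, empty pieces kept).
    let a := (PySem.Chars.splitOn inputString.toList ['.']).map String.ofList
    a.foldl (fun result i =>
      match PySem.Int.ofStr? i with          -- int(i); `none` = the `except` branch
      | some n =>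
        if PySem.Int.toStr n == i then       -- str(int(i)) == str(i)
          (if 0 ≤ n ∧ n ≤ 255 then result else false)
        else false
      | none => false) result

-- ===== PORT B =====
-- the `for c in inputString + '.'` loop of Source B, carrying (octets, value, length)
def pvScanIPv4 : List Char → Nat → Nat → Nat → Bool
  | [], octets, _value, _length => octets == 4
  | c :: cs, octets, value, length =>
    if c == '.' then
      if length == 0 || octets == 4 then false
      else pvScanIPv4 cs (octets + 1) 0 0
    else if '0' ≤ c && c ≤ '9' then
      if decide (0 < length) && value == 0 then false
      else
        let v := value * 10 + (c.toNat - 48)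
        if v > 255 then false else pvScanIPv4 cs octets v (length + 1)
    else false

def isIPv4Address_alt (inputString : String) : Bool :=
  pvScanIPv4 (inputString.toList ++ ['.']) 0 0 0

-- ===== PRECONDITION & SPEC =====
def Spec_isIPv4Address (inputString : String) (out : Bool) : Prop := out = isIPv4Address_alt inputString
instance (inputString : String) (out : Bool) : Decidable (Spec_isIPv4Address inputString out) := by unfold Spec_isIPv4Address; infer_instance

-- ===== CLAIM (what is proved, stated in full; the proofs are below) =====
def Claim_equal_isIPv4Address : Prop := ∀ (inputString : String), Dom_isIPv4Address inputString → Spec_isIPv4Address inputString (isIPv4Address inputString)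

-- ===== LEMMAS AND PROOFS =====

-- A's per-part check, on the character level
def pvOkA (p : List Char) : Bool :=
  match PySem.Int.ofChars? p with
  | some n => if PySem.Int.toChars n == p then (if 0 ≤ n ∧ n ≤ 255 then true else false) else false
  | none => false

-- B's per-part check: the digit loop of pvScanIPv4 restricted to one dot-free piece
def pvPartOk : List Char → Nat → Nat → Bool
  | [], _v, l => l != 0
  | c :: p, v, l =>
    if '0' ≤ c && c ≤ '9' then
      if decide (0 < l) && v == 0 then false
      else
        let v' := v * 10 + (c.toNat - 48)
        if v' > 255 then false else pvPartOk p v' (l + 1)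
    else false

-- reference split on '.'
def pvSplitDot : List Char → List (List Char)
  | [] => [[]]
  | c :: cs => if c = '.' then [] :: pvSplitDot cs else (pvSplitDot cs).modifyHead (c :: ·)

-- B's behaviour on the sequence of pieces
def pvPartsOk : List (List Char) → Nat → Bool
  | [], o => o == 4
  | p :: ps, o => if pvPartOk p 0 0 then (if o == 4 then false else pvPartsOk ps (o + 1)) else false

theorem pvSplitDot_ne_nil (cs : List Char) : pvSplitDot cs ≠ [] := by
  induction cs with
  | nil => simp [pvSplitDot]
  | cons c cs ih =>
    simp only [pvSplitDot]
    split
    · simp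
    · cases h : pvSplitDot cs with
      | nil => exact absurd h ih
      | cons a as => simp [List.modifyHead]

theorem length_pvSplitDot (cs : List Char) :
    (pvSplitDot cs).length = cs.countP (· = '.') + 1 := by
  induction cs with
  | nil => simp [pvSplitDot]
  | cons c cs ih =>
    simp only [pvSplitDot, List.countP_cons]
    by_cases hc : c = '.' <;> simp [hc, ih]

theorem pv_go_count_spec (l : List Char) : ∀ (fuel acc : Nat), l.length ≤ fuel →
    PySem.Chars.count.go ['.'] fuel l acc = acc + l.countP (· = '.') := by
  induction l with
  | nil => intro fuel acc _; cases fuel <;> simp [PySem.Chars.count.go]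
  | cons c rest ih =>
    intro fuel acc hf
    cases fuel with
    | zero => simp at hf
    | succ fuel =>
      by_cases hc : c = '.'
      · subst hc
        rw [PySem.Chars.count.go]
        simp only [List.isPrefixOf, BEq.rfl, Bool.true_and, List.length_cons,
          List.length_nil, List.drop_succ_cons, List.drop_zero]
        rw [ih fuel (acc + 1) (by simpa using Nat.le_of_succ_le_succ hf)]
        simp
        omega
      · rw [PySem.Chars.count.go]
        have hpre : (['.'].isPrefixOf (c :: rest)) = false := by
          simp [List.isPrefixOf]
          exact fun h => hc h.symm
        rw [hpre]
        simp only [if_neg Bool.false_ne_true]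
        rw [ih fuel acc (by simpa using Nat.le_of_succ_le_succ hf)]
        simp [hc]

theorem pv_count_dot (cs : List Char) :
    PySem.Chars.count cs ['.'] = cs.countP (· = '.') := by
  rw [PySem.Chars.count]
  simp only [List.isEmpty_cons, if_neg Bool.false_ne_true]
  simpa using pv_go_count_spec cs cs.length 0 le_rfl

theorem pv_go_split_spec (l : List Char) : ∀ (fuel : Nat) (cur : List Char) (acc : List (List Char)),
    l.length ≤ fuel →
    PySem.Chars.splitOn.go ['.'] fuel l cur acc
      = acc.reverse ++ (pvSplitDot l).modifyHead (cur.reverse ++ ·) := by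
  induction l with
  | nil =>
    intro fuel cur acc _
    cases fuel <;> simp [PySem.Chars.splitOn.go, pvSplitDot, List.modifyHead]
  | cons c rest ih =>
    intro fuel cur acc hf
    cases fuel with
    | zero => simp at hf
    | succ fuel =>
      by_cases hc : c = '.'
      · subst hc
        rw [PySem.Chars.splitOn.go]
        simp only [List.isPrefixOf, BEq.rfl, Bool.true_and, List.length_cons,
          List.length_nil, List.drop_succ_cons, List.drop_zero]
        rw [ih fuel [] (cur.reverse :: acc) (by simpa using Nat.le_of_succ_le_succ hf)]
        simp only [pvSplitDot, List.reverse_cons, List.modifyHead]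
        simp only [List.append_assoc]
        cases pvSplitDot rest <;> simp
      · rw [PySem.Chars.splitOn.go]
        have hpre : (['.'].isPrefixOf (c :: rest)) = false := by
          simp [List.isPrefixOf]
          exact fun h => hc h.symm
        rw [hpre]
        simp only [if_neg Bool.false_ne_true]
        rw [ih fuel (c :: cur) acc (by simpa using Nat.le_of_succ_le_succ hf)]
        simp only [pvSplitDot, if_neg hc, List.reverse_cons]
        cases h : pvSplitDot rest with
        | nil => exact absurd h (pvSplitDot_ne_nil rest)
        | cons a as => simp [List.modifyHead]

theorem pv_splitOn_dot (cs : List Char) :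
    PySem.Chars.splitOn cs ['.'] = pvSplitDot cs := by
  rw [PySem.Chars.splitOn]
  rw [pv_go_split_spec cs (cs.length + 1) [] [] (Nat.le_succ _)]
  cases h : pvSplitDot cs with
  | nil => exact absurd h (pvSplitDot_ne_nil cs)
  | cons a as => simp [List.modifyHead]

-- the foldl of port A is the conjunction of pvOkA over the pieces
theorem pv_beq_toStr (n : Int) (p : List Char) :
    (PySem.Int.toStr n == String.ofList p) = (PySem.Int.toChars n == p) := by
  rw [Bool.eq_iff_iff]
  simp [PySem.Int.toStr, String.ofList_inj]

theorem pv_foldA (l : List (List Char)) : ∀ (r : Bool),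
    ((l.map String.ofList).foldl (fun result i =>
      match PySem.Int.ofStr? i with
      | some n =>
        if PySem.Int.toStr n == i then
          (if 0 ≤ n ∧ n ≤ 255 then result else false)
        else false
      | none => false) r) = (r && l.all pvOkA) := by
  induction l with
  | nil => intro r; simp
  | cons p l ih =>
    intro r
    simp only [List.map_cons, List.foldl_cons, List.all_cons]
    rw [ih]
    have hbody : (match PySem.Int.ofStr? (String.ofList p) with
      | some n =>
        if PySem.Int.toStr n == String.ofList p then
          (if 0 ≤ n ∧ n ≤ 255 then r else false)
        else false
      | none => false) = (r && pvOkA p) := by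
      rcases hn : PySem.Int.ofChars? p with _ | n
      · simp [PySem.Int.ofStr?_ofList, hn, pvOkA]
      · simp only [PySem.Int.ofStr?_ofList, hn, pv_beq_toStr, pvOkA]
        by_cases h1 : (PySem.Int.toChars n == p) = true <;>
          by_cases h2 : 0 ≤ n ∧ n ≤ 255 <;>
            simp [h1, h2]
    rw [hbody]
    cases r <;> simp

-- scanning one dot-free piece followed by '.'
theorem pv_scan_part (p : List Char) : ∀ (rest : List Char) (o v l : Nat), '.' ∉ p →
    pvScanIPv4 (p ++ '.' :: rest) o v l
      = if pvPartOk p v l then (if o == 4 then false else pvScanIPv4 rest (o + 1) 0 0)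
        else false := by
  induction p with
  | nil =>
    intro rest o v l _
    simp only [List.nil_append, pvScanIPv4, pvPartOk]
    by_cases hl : l = 0
    · simp [hl]
    · simp [hl]
  | cons c p ih =>
    intro rest o v l hmem
    have hc : c ≠ '.' := fun h => hmem (h ▸ List.mem_cons_self)
    have hmem' : '.' ∉ p := fun h => hmem (List.mem_cons_of_mem _ h)
    simp only [List.cons_append, pvScanIPv4, pvPartOk]
    have hcb : (c == '.') = false := by simp [hc]
    rw [hcb]
    simp only [Bool.false_eq_true]
    by_cases hd : ('0' ≤ c && c ≤ '9') = true
    · rw [hd]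
      by_cases hz : (decide (0 < l) && v == 0) = true
      · simp [hz]
      · rw [Bool.eq_false_iff.mpr hz]
        simp only [Bool.false_eq_true]
        by_cases hv : v * 10 + (c.toNat - 48) > 255
        · simp [hv]
        · simp only [if_neg hv]
          exact ih rest o _ _ hmem'
    · rw [Bool.eq_false_iff.mpr hd]
      simp

-- dot-free lists are single pieces
theorem pvSplitDot_no_dot (cs : List Char) (h : '.' ∉ cs) : pvSplitDot cs = [cs] := by
  induction cs with
  | nil => rfl
  | cons c cs ih =>
    have hc : c ≠ '.' := fun hh => h (hh ▸ List.mem_cons_self)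
    have h' : '.' ∉ cs := fun hh => h (List.mem_cons_of_mem _ hh)
    simp [pvSplitDot, hc, ih h', List.modifyHead]

theorem pvSplitDot_append (p : List Char) (r : List Char) (h : '.' ∉ p) :
    pvSplitDot (p ++ '.' :: r) = p :: pvSplitDot r := by
  induction p with
  | nil => simp [pvSplitDot]
  | cons c p ih =>
    have hc : c ≠ '.' := fun hh => h (hh ▸ List.mem_cons_self)
    have h' : '.' ∉ p := fun hh => h (List.mem_cons_of_mem _ hh)
    simp [pvSplitDot, hc, ih h', List.modifyHead]

-- the whole scan is pvPartsOk over the pieces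
theorem pv_scan_split (n : Nat) : ∀ (cs : List Char), cs.length ≤ n → ∀ (o : Nat),
    pvScanIPv4 (cs ++ ['.']) o 0 0 = pvPartsOk (pvSplitDot cs) o := by
  induction n with
  | zero =>
    intro cs hcs o
    have : cs = [] := List.eq_nil_of_length_eq_zero (Nat.le_zero.mp hcs)
    subst this
    simp [pvScanIPv4, pvSplitDot, pvPartsOk, pvPartOk]
  | succ n ih =>
    intro cs hcs o
    by_cases hmem : '.' ∈ cs
    · -- split off the first piece
      have hsplit : cs = cs.takeWhile (· ≠ '.') ++ cs.dropWhile (· ≠ '.') :=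
        (List.takeWhile_append_dropWhile).symm
      have hdrop_ne : cs.dropWhile (· ≠ '.') ≠ [] := by
        intro hnil
        have := List.dropWhile_eq_nil_iff.mp hnil
        have h2 := this '.' hmem
        simp at h2
      obtain ⟨d, r, hdr⟩ := List.exists_cons_of_ne_nil hdrop_ne
      have hd : d = '.' := by
        have hhead := List.head_dropWhile_not (p := (· ≠ '.')) (l := cs) hdrop_ne
        have h3 : (cs.dropWhile (· ≠ '.')).head? = some d := by rw [hdr]; rfl
        have h2 := (List.head?_eq_some_head (l := cs.dropWhile (· ≠ '.')) hdrop_ne).symm.trans h3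
        rw [Option.some.injEq] at h2
        rw [h2] at hhead
        simpa using hhead
      subst hd
      have hp : '.' ∉ cs.takeWhile (· ≠ '.') := by
        intro hh
        have := List.mem_takeWhile_imp hh
        simp at this
      have hcs_eq : cs = cs.takeWhile (· ≠ '.') ++ '.' :: r := hsplit.trans (by rw [hdr])
      have hr_len : r.length ≤ n := by
        have hlen := congrArg List.length hcs_eq
        simp [List.length_append] at hlen
        omega
      rw [hcs_eq]
      rw [List.append_assoc]
      simp only [List.cons_append]
      rw [pv_scan_part _ _ _ _ _ hp]
      rw [pvSplitDot_append _ _ hp]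
      simp only [pvPartsOk]
      by_cases hok : pvPartOk (cs.takeWhile (· ≠ '.')) 0 0 = true
      · rw [hok, if_pos rfl, if_pos rfl]
        by_cases ho : o == 4
        · simp [ho]
        · rw [Bool.eq_false_iff.mpr ho]
          simp only [Bool.false_eq_true]
          exact ih r hr_len (o + 1)
      · rw [Bool.eq_false_iff.mpr hok]
        simp
    · rw [pv_scan_part cs [] o 0 0 hmem, pvSplitDot_no_dot cs hmem]
      by_cases hok : pvPartOk cs 0 0 = true <;> simp [pvPartsOk, pvScanIPv4, hok]

-- flatten pvPartsOk into "all pieces valid and exactly four of them"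
theorem pv_partsOk_eq (ps : List (List Char)) : ∀ (o : Nat),
    pvPartsOk ps o = (ps.all (fun p => pvPartOk p 0 0) && (o + ps.length == 4)) := by
  induction ps with
  | nil => intro o; simp [pvPartsOk]
  | cons p ps ih =>
    intro o
    simp only [pvPartsOk, List.all_cons, List.length_cons]
    by_cases hok : pvPartOk p 0 0 = true
    · rw [hok, if_pos rfl]
      simp only [Bool.true_and]
      by_cases ho : o = 4
      · subst ho
        rw [if_pos (show ((4 : Nat) == 4) = true from rfl)]
        have h4 : (4 + (ps.length + 1) == 4) = false := by simp
        rw [h4, Bool.and_false]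
      · rw [if_neg (by simpa using ho)]
        rw [ih (o + 1)]
        congr 1
        simp
        omega
    · rw [Bool.eq_false_iff.mpr hok]
      simp

-- partOk with a large accumulated value forces the piece to end
theorem pv_partOk_hundred (p : List Char) : ∀ (v l : Nat), 100 ≤ v →
    pvPartOk p v l = true → p = [] := by
  induction p with
  | nil => intro v l _ _; rfl
  | cons c p _ih =>
    intro v l hv hok
    exfalso
    simp only [pvPartOk] at hok
    by_cases hd : ('0' ≤ c && c ≤ '9') = true
    · rw [hd, if_pos rfl] at hok
      have hbig : v * 10 + (c.toNat - 48) > 255 := by omega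
      rw [if_pos hbig] at hok
      split at hok <;> simp_all
    · rw [Bool.eq_false_iff.mpr hd] at hok; simp at hok

theorem pv_partOk_ten (p : List Char) : ∀ (v l : Nat), 10 ≤ v →
    pvPartOk p v l = true → p.length ≤ 1 := by
  intro v l hv hok
  cases p with
  | nil => simp
  | cons c p =>
    simp only [pvPartOk] at hok
    by_cases hd : ('0' ≤ c && c ≤ '9') = true
    · rw [hd, if_pos rfl] at hok
      by_cases hz : (decide (0 < l) && v == 0) = true
      · rw [if_pos hz] at hok; simp at hok
      · rw [Bool.eq_false_iff.mpr hz] at hok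
        simp only [Bool.false_eq_true] at hok
        by_cases hb : v * 10 + (c.toNat - 48) > 255
        · rw [if_pos hb] at hok; simp at hok
        · rw [if_neg hb] at hok
          have := pv_partOk_hundred p _ _ (by omega) hok
          simp [this]
    · rw [Bool.eq_false_iff.mpr hd] at hok; simp at hok

theorem pv_partOk_one (p : List Char) : ∀ (v l : Nat), 1 ≤ v →
    pvPartOk p v l = true → p.length ≤ 2 := by
  intro v l hv hok
  cases p with
  | nil => simp
  | cons c p =>
    simp only [pvPartOk] at hok
    by_cases hd : ('0' ≤ c && c ≤ '9') = true
    · rw [hd, if_pos rfl] at hok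
      by_cases hz : (decide (0 < l) && v == 0) = true
      · rw [if_pos hz] at hok; simp at hok
      · rw [Bool.eq_false_iff.mpr hz] at hok
        simp only [Bool.false_eq_true] at hok
        by_cases hb : v * 10 + (c.toNat - 48) > 255
        · rw [if_pos hb] at hok; simp at hok
        · rw [if_neg hb] at hok
          have := pv_partOk_ten p _ _ (by omega) hok
          simp; omega
    · rw [Bool.eq_false_iff.mpr hd] at hok; simp at hok

-- a digit character is Char.ofNat (48 + d) for its value d < 10
theorem pv_digit_rep (c : Char) (hd : ('0' ≤ c && c ≤ '9') = true) :
    ∃ d, d < 10 ∧ c = Char.ofNat (48 + d) := by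
  have h1 : '0' ≤ c ∧ c ≤ '9' := by simpa using hd
  have h48 : 48 ≤ c.toNat ∧ c.toNat ≤ 57 := by
    constructor
    · exact h1.1
    · exact h1.2
  refine ⟨c.toNat - 48, by omega, ?_⟩
  have : 48 + (c.toNat - 48) = c.toNat := by omega
  rw [this, Char.ofNat_toNat]

-- enumerated per-shape agreement of the two per-part checks (kernel evaluation)
set_option maxRecDepth 10000 in
theorem pv_enum1 : (List.range 10).all (fun a =>
    pvPartOk [Char.ofNat (48 + a)] 0 0 == pvOkA [Char.ofNat (48 + a)]) = true := by decide

set_option maxRecDepth 10000 in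
theorem pv_enum2 : (List.range 10).all (fun a => (List.range 10).all (fun b =>
    pvPartOk [Char.ofNat (48 + a), Char.ofNat (48 + b)] 0 0
      == pvOkA [Char.ofNat (48 + a), Char.ofNat (48 + b)])) = true := by decide

set_option maxRecDepth 10000 in
theorem pv_enum3 : (List.range 10).all (fun a => (List.range 10).all (fun b => (List.range 10).all (fun c =>
    pvPartOk [Char.ofNat (48 + a), Char.ofNat (48 + b), Char.ofNat (48 + c)] 0 0
      == pvOkA [Char.ofNat (48 + a), Char.ofNat (48 + b), Char.ofNat (48 + c)]))) = true := by decide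

set_option maxRecDepth 10000 in
theorem pv_enum256 : (List.range 256).all (fun k =>
    pvPartOk (PySem.Int.toChars (k : Int)) 0 0) = true := by decide

-- pvPartOk accepts → every character of the piece is a digit
theorem pv_partOk_all_digits (p : List Char) : ∀ (v l : Nat), pvPartOk p v l = true →
    ∀ c ∈ p, ('0' ≤ c && c ≤ '9') = true := by
  induction p with
  | nil => intro v l _ c hc; simp at hc
  | cons c q ih =>
    intro v l hok x hx
    simp only [pvPartOk] at hok
    by_cases hd : ('0' ≤ c && c ≤ '9') = true
    · rcases List.mem_cons.mp hx with h | h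
      · subst h; exact hd
      · rw [hd, if_pos rfl] at hok
        by_cases hz : (decide (0 < l) && v == 0) = true
        · rw [if_pos hz] at hok; simp at hok
        · rw [Bool.eq_false_iff.mpr hz] at hok
          simp only [Bool.false_eq_true] at hok
          by_cases hb : v * 10 + (c.toNat - 48) > 255
          · rw [if_pos hb] at hok; simp at hok
          · rw [if_neg hb] at hok
            exact ih _ _ hok x h
    · rw [Bool.eq_false_iff.mpr hd] at hok; simp at hok

-- pvPartOk accepts → the piece starts with digits (shape extraction)
theorem pv_partOk_digits (c : Char) (p : List Char) (v l : Nat)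
    (hok : pvPartOk (c :: p) v l = true) : ('0' ≤ c && c ≤ '9') = true := by
  simp only [pvPartOk] at hok
  by_cases hd : ('0' ≤ c && c ≤ '9') = true
  · exact hd
  · rw [Bool.eq_false_iff.mpr hd] at hok; simp at hok

theorem pv_okA_of_partOk (p : List Char) (hok : pvPartOk p 0 0 = true) : pvOkA p = true := by
  -- the piece has length ≤ 3 and consists of digits; finish by enumeration
  have hlen : p.length ≤ 3 := by
    cases p with
    | nil => simp
    | cons c q =>
      have hd := pv_partOk_digits c q 0 0 hok
      simp only [pvPartOk, hd] at hok
      have hz : (decide (0 < 0) && (0 == 0)) = false := by simp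
      rw [hz] at hok
      simp only [Bool.false_eq_true] at hok
      by_cases hb : 0 * 10 + (c.toNat - 48) > 255
      · rw [if_pos hb] at hok; simp at hok
      · rw [if_neg hb] at hok
        by_cases hv0 : c.toNat - 48 = 0
        · -- leading zero: the next digit is refused, so q = []
          cases q with
          | nil => simp
          | cons c2 q2 =>
            exfalso
            have hd2 := pv_partOk_digits c2 q2 _ _ hok
            simp only [pvPartOk, hd2] at hok
            have : (decide (0 < 0 + 1) && ((0 * 10 + (c.toNat - 48)) == 0)) = true := by
              simp [hv0]
            rw [this, if_pos rfl] at hok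
            simp at hok
        · have := pv_partOk_one q _ _ (by omega) hok
          simp; omega
  have hdig : ∀ c ∈ p, ('0' ≤ c && c ≤ '9') = true := pv_partOk_all_digits p 0 0 hok
  -- now p is one of the enumerated shapes
  match p, hlen with
  | [], _ => simp [pvPartOk] at hok
  | [c], _ =>
    obtain ⟨a, ha, rfl⟩ := pv_digit_rep c (hdig c (by simp))
    have := (List.all_eq_true.mp pv_enum1) a (List.mem_range.mpr ha)
    simp only [beq_iff_eq] at this
    rw [← this]; exact hok
  | [c1, c2], _ =>
    obtain ⟨a, ha, rfl⟩ := pv_digit_rep c1 (hdig c1 (by simp))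
    obtain ⟨b, hb, rfl⟩ := pv_digit_rep c2 (hdig c2 (by simp))
    have h1 := (List.all_eq_true.mp pv_enum2) a (List.mem_range.mpr ha)
    have h2 := (List.all_eq_true.mp (h1)) b (List.mem_range.mpr hb)
    simp only [beq_iff_eq] at h2
    rw [← h2]; exact hok
  | [c1, c2, c3], _ =>
    obtain ⟨a, ha, rfl⟩ := pv_digit_rep c1 (hdig c1 (by simp))
    obtain ⟨b, hb, rfl⟩ := pv_digit_rep c2 (hdig c2 (by simp))
    obtain ⟨c, hc, rfl⟩ := pv_digit_rep c3 (hdig c3 (by simp))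
    have h1 := (List.all_eq_true.mp pv_enum3) a (List.mem_range.mpr ha)
    have h2 := (List.all_eq_true.mp h1) b (List.mem_range.mpr hb)
    have h3 := (List.all_eq_true.mp h2) c (List.mem_range.mpr hc)
    simp only [beq_iff_eq] at h3
    rw [← h3]; exact hok

theorem pv_partOk_of_okA (p : List Char) (hok : pvOkA p = true) : pvPartOk p 0 0 = true := by
  unfold pvOkA at hok
  cases hn : PySem.Int.ofChars? p with
  | none => rw [hn] at hok; simp at hok
  | some n =>
    rw [hn] at hok
    simp only [] at hok
    by_cases h1 : (PySem.Int.toChars n == p) = true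
    · rw [h1] at hok
      by_cases h2 : 0 ≤ n ∧ n ≤ 255
      · have hk : n = ((n.toNat : Nat) : Int) := by omega
        have hklt : n.toNat < 256 := by omega
        have := (List.all_eq_true.mp pv_enum256) n.toNat (List.mem_range.mpr hklt)
        rw [← (beq_iff_eq.mp h1)]
        rw [hk]
        exact this
      · rw [if_neg h2] at hok; simp at hok
    · rw [Bool.eq_false_iff.mpr h1] at hok; simp at hok

theorem pv_okA_eq_partOk (p : List Char) : pvOkA p = pvPartOk p 0 0 := by
  by_cases h : pvPartOk p 0 0 = true
  · rw [h, pv_okA_of_partOk p h]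
  · rw [Bool.eq_false_iff.mpr h]
    by_cases h2 : pvOkA p = true
    · exact absurd (pv_partOk_of_okA p h2) h
    · exact Bool.eq_false_iff.mpr h2

-- ===== VERDICT (by name: the statement is the Claim_ definition above) =====
theorem isIPv4Address_spec : Claim_equal_isIPv4Address := by
  intro s _
  unfold Spec_isIPv4Address
  have hB : isIPv4Address_alt s
      = (((pvSplitDot s.toList).all fun p => pvPartOk p 0 0)
          && (0 + (pvSplitDot s.toList).length == 4)) := by
    rw [isIPv4Address_alt, pv_scan_split s.toList.length s.toList le_rfl 0, pv_partsOk_eq]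
  rw [hB]
  simp only [isIPv4Address, PySem.Str.count_eq]
  have hdot : (".".toList : List Char) = ['.'] := rfl
  rw [hdot, pv_count_dot, pv_splitOn_dot]
  have hall : pvOkA = (fun p => pvPartOk p 0 0) := funext pv_okA_eq_partOk
  by_cases hc : s.toList.countP (· = '.') = 3
  · rw [if_neg (by simp [hc])]
    rw [pv_foldA, length_pvSplitDot, hc, hall]
    simp
  · rw [if_pos (by simpa using hc)]
    rw [length_pvSplitDot]
    have h4 : (0 + (s.toList.countP (· = '.') + 1) == 4) = false := by
      simp; omega
    rw [h4, Bool.and_false]
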